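-- pv_equiv track=rewrite | github.com/mshablovskyy/prg-basics | 10-MockTest2/p3.py | f
-- ===== SOURCE A (Python) =====
-- def f(array2):
--     dim = len(array2)
--     for i in range(dim):
--         row = 0
--         col = 0
--         for x in range(dim):
--             row += array2[i][x]
--             col += array2[x][i]
--         if row != col:
--             return False
--     return True
-- ===== SOURCE B (Python) =====
-- def f(array2):
--     # Skew-symmetry trick: row_i - col_i = sum over x of (a[i][x] - a[x][i]);
--     # the diagonal term vanishes and t = a[i][x]-a[x][i] is antisymmetric, so one
--     # pass over the strict upper triangle accumulates every row/col difference.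
--     dim = len(array2)
--     diff = [0] * dim
--     for i in range(dim):
--         for x in range(i + 1, dim):
--             t = array2[i][x] - array2[x][i]
--             diff[i] += t
--             diff[x] -= t
--     return all(v == 0 for v in diff)
-- ===== Notes on version B (the rewrite author's own statement) =====
-- stated objective: alternative
-- what changed: A compares each row sum with its column sum via a fused nested loop with early return; B exploits skew-symmetry: one pass over the strict upper triangle accumulates t = a[i][x]-a[x][i] into a difference array (diff[i] += t, diff[x] -= t), then checks all differences are zero, halving the element reads and never touching the diagonal.
-- outside the precondition, e.g. on f([[0, 9, 0], [0, 0, 0], [0]]): A returns False, B raises IndexError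
import Mathlib
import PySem

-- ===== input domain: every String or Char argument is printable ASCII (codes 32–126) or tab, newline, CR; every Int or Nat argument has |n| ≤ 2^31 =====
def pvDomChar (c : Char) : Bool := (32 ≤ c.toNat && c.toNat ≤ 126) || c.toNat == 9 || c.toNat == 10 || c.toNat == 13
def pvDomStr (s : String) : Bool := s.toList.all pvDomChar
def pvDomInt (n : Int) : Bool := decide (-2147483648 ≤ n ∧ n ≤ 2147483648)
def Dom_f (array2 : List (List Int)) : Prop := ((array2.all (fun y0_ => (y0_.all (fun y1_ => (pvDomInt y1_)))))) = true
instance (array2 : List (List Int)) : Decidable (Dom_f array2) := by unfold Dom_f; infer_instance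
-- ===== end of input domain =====

-- B replaces A's fused row-sum/column-sum comparison loop (with early return) by a
-- skew-symmetry pass: it accumulates t = a[i][x]-a[x][i] over the strict upper triangle
-- into a difference array and checks all entries are zero (alternative algorithm, same cost).

-- ===== PORT A =====
-- array2[i][x] under Pre_ (all indices in range); the default is never reached inside Pre_
def pvAtA (array2 : List (List Int)) (i x : Int) : Int :=
  PySem.List.pyGetD (PySem.List.pyGetD array2 i []) x 0

def fLoopA (array2 : List (List Int)) (dim : Int) : List Int → Bool
  | [] => true
  | i :: rest =>
    -- row = 0; col = 0; for x in range(dim): row += array2[i][x]; col += array2[x][i]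
    let p := (PySem.List.pyRange 0 dim 1).foldl
      (fun (rc : Int × Int) x => (rc.1 + pvAtA array2 i x, rc.2 + pvAtA array2 x i)) (0, 0)
    if p.1 ≠ p.2 then false else fLoopA array2 dim rest

def f (array2 : List (List Int)) : Bool :=
  let dim : Int := array2.length
  fLoopA array2 dim (PySem.List.pyRange 0 dim 1)

-- ===== PORT B =====
def pvAtB (array2 : List (List Int)) (i x : Int) : Int :=
  PySem.List.pyGetD (PySem.List.pyGetD array2 i []) x 0

-- t = array2[i][x] - array2[x][i]
def pvT (array2 : List (List Int)) (p : Int × Int) : Int :=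
  pvAtB array2 p.1 p.2 - pvAtB array2 p.2 p.1

-- diff[i] += t; diff[x] -= t  (the loop indices are always in range under Pre_)
def pvStep (array2 : List (List Int)) (d : List Int) (p : Int × Int) : List Int :=
  let t := pvT array2 p
  let d1 := PySem.List.pySetD d p.1 (PySem.List.pyGetD d p.1 0 + t)
  PySem.List.pySetD d1 p.2 (PySem.List.pyGetD d1 p.2 0 - t)

def f_alt (array2 : List (List Int)) : Bool :=
  let dim : Int := array2.length
  -- diff = [0] * dim; for i in range(dim): for x in range(i+1, dim): …
  let diff := (PySem.List.pyRange 0 dim 1).foldl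
    (fun d i => (PySem.List.pyRange (i + 1) dim 1).foldl (fun d x => pvStep array2 d (i, x)) d)
    (List.replicate array2.length (0 : Int))
  -- all(v == 0 for v in diff)
  diff.all (fun v => v == 0)

-- ===== PRECONDITION & SPEC =====
-- Pre_ excludes ragged inputs with a row shorter than len(array2): both Pythons index
-- array2[x][i] there and raise IndexError, except that A's early return can yield False
-- on some ragged inputs before the short row is reached, where B still raises (see cites).
def Pre_f (array2 : List (List Int)) : Prop :=
  ∀ row ∈ array2, array2.length ≤ row.length
instance (array2 : List (List Int)) : Decidable (Pre_f array2) := by unfold Pre_f; infer_instance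

def pvWitness_f : List (List Int) := [[1, 2], [3, 4]]

def Spec_f (array2 : List (List Int)) (out : Bool) : Prop := out = f_alt array2
instance (array2 : List (List Int)) (out : Bool) : Decidable (Spec_f array2 out) := by unfold Spec_f; infer_instance

-- ===== CLAIM (what is proved, stated in full; the proofs are below) =====
def Claim_equal_f : Prop := ∀ (array2 : List (List Int)), Dom_f array2 → Pre_f array2 → Spec_f array2 (f array2)

-- ===== LEMMAS AND PROOFS =====

theorem step_length (array2 : List (List Int)) (d : List Int) (p : Int × Int) :
    (pvStep array2 d p).length = d.length := by
  simp [pvStep, PySem.List.length_pySetD]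

theorem step_get (array2 : List (List Int)) (d : List Int) (p : Int × Int)
    (h1 : 0 ≤ p.1) (h1' : p.1 < (d.length : Int)) (h2 : 0 ≤ p.2) (h2' : p.2 < (d.length : Int))
    (j : Int) (hj : 0 ≤ j) :
    PySem.List.pyGetD (pvStep array2 d p) j 0
      = PySem.List.pyGetD d j 0 + (if p.1 = j then pvT array2 p else 0)
        + (if p.2 = j then -(pvT array2 p) else 0) := by
  obtain ⟨i, x⟩ := p
  obtain ⟨ni, rfl⟩ : ∃ n : Nat, i = (n : Int) := ⟨i.toNat, (Int.toNat_of_nonneg h1).symm⟩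
  obtain ⟨nx, rfl⟩ : ∃ n : Nat, x = (n : Int) := ⟨x.toNat, (Int.toNat_of_nonneg h2).symm⟩
  obtain ⟨nj, rfl⟩ : ∃ n : Nat, j = (n : Int) := ⟨j.toNat, (Int.toNat_of_nonneg hj).symm⟩
  simp only at h1' h2'
  have hi : ni < d.length := by exact_mod_cast h1'
  have hx : nx < d.length := by exact_mod_cast h2'
  have hx' : nx < (PySem.List.pySetD d (ni : Int) (PySem.List.pyGetD d (ni : Int) 0 + pvT array2 ((ni : Int), (nx : Int)))).length := by
    simpa [PySem.List.length_pySetD] using hx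
  simp only [pvStep]
  rw [PySem.List.pyGetD_pySetD_natCast _ nx nj _ _ hx',
      PySem.List.pyGetD_pySetD_natCast _ ni nj _ _ hi,
      PySem.List.pyGetD_pySetD_natCast _ ni nx _ _ hi]
  by_cases e1 : nj = ni <;> by_cases e2 : nj = nx <;>
    simp [e1, e2, Nat.cast_inj, eq_comm] <;> split_ifs <;> (simp_all; try ring)

theorem fold_get (array2 : List (List Int)) (ps : List (Int × Int)) (d : List Int)
    (hps : ∀ p ∈ ps, 0 ≤ p.1 ∧ p.1 < (d.length : Int) ∧ 0 ≤ p.2 ∧ p.2 < (d.length : Int))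
    (j : Int) (hj : 0 ≤ j) :
    PySem.List.pyGetD (ps.foldl (pvStep array2) d) j 0
      = PySem.List.pyGetD d j 0
        + (ps.map (fun p => (if p.1 = j then pvT array2 p else 0)
            + (if p.2 = j then -(pvT array2 p) else 0))).sum := by
  induction ps generalizing d with
  | nil => simp
  | cons p t ih =>
    obtain ⟨hp1, hp1', hp2, hp2'⟩ := hps p (List.mem_cons_self ..)
    have hlen : ((pvStep array2 d p).length : Int) = (d.length : Int) := by
      rw [step_length]
    rw [List.foldl_cons, ih (pvStep array2 d p)
      (fun q hq => by rw [hlen]; exact hps q (List.mem_cons_of_mem _ hq)) ,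
      step_get array2 d p hp1 hp1' hp2 hp2' j hj]
    simp [List.map_cons]
    ring

theorem sum_ite_single (n : Nat) (lo hi : Int) (hn : (hi - lo).toNat = n) (j : Int) (c : Int → Int) :
    ((PySem.List.pyRange lo hi 1).map (fun x => if x = j then c x else 0)).sum
      = if lo ≤ j ∧ j < hi then c j else 0 := by
  induction n generalizing lo with
  | zero =>
    rw [PySem.List.pyRange_one_eq_nil (by omega)]
    simp
    omega
  | succ m ih =>
    rw [PySem.List.pyRange_one_cons (by omega)]
    rw [List.map_cons, List.sum_cons, ih (lo + 1) (by omega)]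
    by_cases e : lo = j
    · subst e
      simp
      omega
    · simp [e]
      split_ifs <;> simp_all <;> omega

theorem sum_flatMap_int (l : List Int) (g : Int → List Int) :
    (l.flatMap g).sum = (l.map (fun x => (g x).sum)).sum := by
  induction l with
  | nil => rfl
  | cons a t ih => simp [List.flatMap_cons, ih]

theorem sum_map_sub_int (l : List Int) (f g : Int → Int) :
    (l.map (fun x => f x - g x)).sum = (l.map f).sum - (l.map g).sum := by
  induction l with
  | nil => rfl
  | cons a t ih => simp [ih]; ring

theorem diff_get (array2 : List (List Int)) (j : Int) (hj0 : 0 ≤ j)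
    (hj : j < (array2.length : Int)) :
    PySem.List.pyGetD
      ((PySem.List.pyRange 0 (array2.length : Int) 1).foldl
        (fun d i => (PySem.List.pyRange (i + 1) (array2.length : Int) 1).foldl
          (fun d x => pvStep array2 d (i, x)) d)
        (List.replicate array2.length (0 : Int))) j 0
      = ((PySem.List.pyRange 0 (array2.length : Int) 1).map (fun x => pvAtB array2 j x)).sum
        - ((PySem.List.pyRange 0 (array2.length : Int) 1).map (fun x => pvAtB array2 x j)).sum := by
  have hnest : ∀ (d0 : List Int),
      (PySem.List.pyRange 0 (array2.length : Int) 1).foldl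
        (fun d i => (PySem.List.pyRange (i + 1) (array2.length : Int) 1).foldl
          (fun d x => pvStep array2 d (i, x)) d) d0
      = ((PySem.List.pyRange 0 (array2.length : Int) 1).flatMap
          (fun i => (PySem.List.pyRange (i + 1) (array2.length : Int) 1).map (fun x => (i, x)))).foldl
          (pvStep array2) d0 := by
    intro d0
    rw [List.foldl_flatMap]
    congr 1
    funext d i
    rw [List.foldl_map]
  rw [hnest]
  rw [fold_get array2 _ _ ?bounds j hj0]
  case bounds =>
    intro p hp
    simp only [List.mem_flatMap, List.mem_map] at hp
    obtain ⟨i, hi, x, hx, rfl⟩ := hp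
    rw [PySem.List.mem_pyRange_one] at hi hx
    simp [List.length_replicate]
    omega
  -- pyGetD of replicate is 0
  have hrep : PySem.List.pyGetD (List.replicate array2.length (0 : Int)) j 0 = 0 := by
    obtain ⟨nj, rfl⟩ : ∃ n : Nat, j = (n : Int) := ⟨j.toNat, (Int.toNat_of_nonneg hj0).symm⟩
    rw [PySem.List.pyGetD_natCast]
    rcases Nat.lt_or_ge nj array2.length with h | h
    · rw [List.getD_eq_getElem _ _ (by simpa using h)]; simp
    · rw [List.getD_eq_default _ _ (by simpa using h)]
  rw [hrep, zero_add]
  -- sum over the flatMap of pairs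
  rw [List.map_flatMap, sum_flatMap_int]
  simp only [List.map_map]
  have hsplit : PySem.List.pyRange 0 (array2.length : Int) 1
      = PySem.List.pyRange 0 j 1 ++ j :: PySem.List.pyRange (j + 1) (array2.length : Int) 1 := by
    rw [PySem.List.pyRange_one_append 0 j _ hj0 (le_of_lt hj), PySem.List.pyRange_one_cons hj]
  rw [hsplit]
  simp only [List.map_append, List.map_cons, List.sum_append, List.sum_cons]
  have p1 : (List.map
        (fun i =>
          (List.map
              ((fun p => (if p.1 = j then pvT array2 p else 0) + if p.2 = j then -pvT array2 p else 0) ∘ fun x => (i, x))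
              (PySem.List.pyRange (i + 1) (array2.length : Int))).sum)
        (PySem.List.pyRange 0 j)).sum
      = (List.map (fun i => -pvT array2 (i, j)) (PySem.List.pyRange 0 j)).sum := by
    congr 1
    apply List.map_congr_left
    intro i hi
    rw [PySem.List.mem_pyRange_one] at hi
    have hij : i ≠ j := by omega
    simp only [Function.comp_def, hij, if_false, zero_add]
    rw [sum_ite_single ((array2.length : Int) - (i + 1)).toNat (i + 1) _ rfl j _]
    rw [if_pos ⟨by omega, hj⟩]
  have p2 : (List.map
        ((fun p => (if p.1 = j then pvT array2 p else 0) + if p.2 = j then -pvT array2 p else 0) ∘ fun x => (j, x))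
        (PySem.List.pyRange (j + 1) (array2.length : Int))).sum
      = (List.map (fun x => pvT array2 (j, x)) (PySem.List.pyRange (j + 1) (array2.length : Int))).sum
        + (List.map (fun x => if x = j then -pvT array2 (j, x) else 0) (PySem.List.pyRange (j + 1) (array2.length : Int))).sum := by
    rw [← PySem.List.sum_map_add_int]
    simp [Function.comp_def]
  have p3 : (List.map
        (fun i =>
          (List.map
              ((fun p => (if p.1 = j then pvT array2 p else 0) + if p.2 = j then -pvT array2 p else 0) ∘ fun x => (i, x))
              (PySem.List.pyRange (i + 1) (array2.length : Int))).sum)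
        (PySem.List.pyRange (j + 1) (array2.length : Int))).sum
      = (List.map (fun _ => (0 : Int)) (PySem.List.pyRange (j + 1) (array2.length : Int))).sum := by
    congr 1
    apply List.map_congr_left
    intro i hi
    rw [PySem.List.mem_pyRange_one] at hi
    have hij : i ≠ j := by omega
    simp only [Function.comp_def, hij, if_false, zero_add]
    rw [sum_ite_single ((array2.length : Int) - (i + 1)).toNat (i + 1) _ rfl j _]
    rw [if_neg (by omega)]
  rw [p1, p2, p3]
  rw [sum_ite_single ((array2.length : Int) - (j + 1)).toNat (j + 1) _ rfl j _, if_neg (by omega)]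
  have e1 : (List.map (fun i => -pvT array2 (i, j)) (PySem.List.pyRange 0 j)).sum
      = (List.map (fun x => pvAtB array2 j x) (PySem.List.pyRange 0 j)).sum
        - (List.map (fun x => pvAtB array2 x j) (PySem.List.pyRange 0 j)).sum := by
    rw [← sum_map_sub_int]
    congr 1
    apply List.map_congr_left
    intro i _
    simp [pvT]
  have e2 : (List.map (fun x => pvT array2 (j, x)) (PySem.List.pyRange (j + 1) (array2.length : Int))).sum
      = (List.map (fun x => pvAtB array2 j x) (PySem.List.pyRange (j + 1) (array2.length : Int))).sum
        - (List.map (fun x => pvAtB array2 x j) (PySem.List.pyRange (j + 1) (array2.length : Int))).sum := by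
    rw [← sum_map_sub_int]
    congr 1
  rw [e1, e2]
  simp
  ring

theorem pairfold (g h : Int → Int) (l : List Int) (a b : Int) :
    l.foldl (fun (rc : Int × Int) x => (rc.1 + g x, rc.2 + h x)) (a, b)
      = (l.foldl (fun s x => s + g x) a, l.foldl (fun s x => s + h x) b) := by
  induction l generalizing a b with
  | nil => rfl
  | cons y ys ih => simp [List.foldl, ih]

theorem loop_eq (array2 : List (List Int)) (dim : Int) (l : List Int) :
    fLoopA array2 dim l
      = decide (l.map (fun i => (PySem.List.pyRange 0 dim 1).foldl (fun a x => a + pvAtA array2 i x) 0)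
              = l.map (fun i => (PySem.List.pyRange 0 dim 1).foldl (fun a x => a + pvAtA array2 x i) 0)) := by
  induction l with
  | nil => simp [fLoopA]
  | cons i rest ih =>
    rw [fLoopA]
    simp only [pairfold]
    by_cases h : (PySem.List.pyRange 0 dim 1).foldl (fun a x => a + pvAtA array2 i x) 0
                = (PySem.List.pyRange 0 dim 1).foldl (fun a x => a + pvAtA array2 x i) 0
    · simp [h, ih]
    · simp [h]

theorem nested_length (array2 : List (List Int)) (L : List Int) (d0 : List Int) :
    (L.foldl (fun d i => (PySem.List.pyRange (i + 1) (array2.length : Int) 1).foldl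
        (fun d x => pvStep array2 d (i, x)) d) d0).length = d0.length := by
  induction L generalizing d0 with
  | nil => rfl
  | cons i t ih =>
    rw [List.foldl_cons, ih]
    generalize d0 = d
    induction (PySem.List.pyRange (i + 1) (array2.length : Int) 1) generalizing d with
    | nil => rfl
    | cons x xs ihx => rw [List.foldl_cons, ihx, step_length]

theorem pvAtB_eq_pvAtA : pvAtB = pvAtA := rfl

theorem final_eq (array2 : List (List Int)) : f array2 = f_alt array2 := by
  unfold f f_alt
  rw [loop_eq]
  set dim : Int := (array2.length : Int) with hdim
  set diff := (PySem.List.pyRange 0 dim 1).foldl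
    (fun d i => (PySem.List.pyRange (i + 1) dim 1).foldl (fun d x => pvStep array2 d (i, x)) d)
    (List.replicate array2.length (0 : Int)) with hdiff
  have hlen : diff.length = array2.length := by
    rw [hdiff, nested_length, List.length_replicate]
  have key : (diff.all (fun v => v == 0) = true)
      ↔ ((PySem.List.pyRange 0 dim 1).map
            (fun i => (PySem.List.pyRange 0 dim 1).foldl (fun a x => a + pvAtA array2 i x) 0)
        = (PySem.List.pyRange 0 dim 1).map
            (fun i => (PySem.List.pyRange 0 dim 1).foldl (fun a x => a + pvAtA array2 x i) 0)) := by
    rw [List.all_eq_true, List.map_eq_map_iff]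
    constructor
    · intro h i hi
      rw [PySem.List.mem_pyRange_one] at hi
      obtain ⟨k, rfl⟩ : ∃ n : Nat, i = (n : Int) := ⟨i.toNat, (Int.toNat_of_nonneg hi.1).symm⟩
      have hk : k < diff.length := by omega
      have h0 : diff[k] = 0 := by
        have := h diff[k] (List.getElem_mem hk)
        simpa using this
      have hget : PySem.List.pyGetD diff (k : Int) 0 = diff[k] := by
        rw [PySem.List.pyGetD_natCast, List.getD_eq_getElem _ _ hk]
      have hdg := diff_get array2 (k : Int) hi.1 hi.2
      simp only [← hdim, pvAtB_eq_pvAtA] at hdg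
      rw [← hdiff] at hdg
      rw [hget, h0] at hdg
      rw [PySem.List.foldl_add, PySem.List.foldl_add]
      have hS := sub_eq_zero.mp hdg.symm
      simpa using hS
    · intro h v hv
      obtain ⟨k, hk, rfl⟩ := List.mem_iff_getElem.mp hv
      have hki : (0:Int) ≤ (k : Int) ∧ (k : Int) < dim := by
        constructor
        · exact_mod_cast Nat.zero_le k
        · omega
      have hi := h (k : Int) (PySem.List.mem_pyRange_one.mpr hki)
      rw [PySem.List.foldl_add, PySem.List.foldl_add] at hi
      have hdg := diff_get array2 (k : Int) hki.1 hki.2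
      have hget : PySem.List.pyGetD diff (k : Int) 0 = diff[k] := by
        rw [PySem.List.pyGetD_natCast, List.getD_eq_getElem _ _ hk]
      simp only [← hdim, pvAtB_eq_pvAtA] at hdg
      rw [← hdiff, hget] at hdg
      simp only [beq_iff_eq]
      rw [hdg, sub_eq_zero]
      simpa using hi
  by_cases H : ((PySem.List.pyRange 0 dim 1).map
            (fun i => (PySem.List.pyRange 0 dim 1).foldl (fun a x => a + pvAtA array2 i x) 0)
        = (PySem.List.pyRange 0 dim 1).map
            (fun i => (PySem.List.pyRange 0 dim 1).foldl (fun a x => a + pvAtA array2 x i) 0))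
  · simp only [H, decide_true]
    exact (key.mpr H).symm ▸ rfl
  · simp only [H, decide_false]
    by_contra hc
    exact H (key.mp (by revert hc; cases diff.all (fun v => v == 0) <;> simp))

-- ===== VERDICT (by name: the statement is the Claim_ definition above) =====
theorem f_spec : Claim_equal_f := by
  intro array2 _ _
  show f array2 = f_alt array2
  exact final_eq array2
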